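-- pv_equiv track=rewrite | github.com/richas26/AI-Based-Industry-Feedback-and-Auto-Response-System- | prompts.py | viit_mentor_summary_prompt
-- ===== SOURCE A (Python) =====
-- def viit_mentor_summary_prompt(data_dict, mentor_name):
--     """
--     Creates a VIIT-Mentor-wise summary prompt for the LLM.
--     """
--     mentor_column = data_dict['Faculty Mentor from VIIT ']
--
--     # Filter rows where the mentor name matches
--     mentor_feedback = {key: [] for key in data_dict.keys()}
--
--     for idx, mentor in enumerate(mentor_column):
--         if mentor == mentor_name:
--             for key in data_dict.keys():
--                 mentor_feedback[key].append(data_dict[key][idx])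
--
--     prompt = f"""
--     Provide a summary for the VIIT Mentor '{mentor_name}' based on the following internship feedback data:
--     {mentor_feedback}
--     Summarize the mentor's involvement, feedback, and performance trends across students they supervised.
--     """
--     return prompt
-- ===== SOURCE B (Python) =====
-- def viit_mentor_summary_prompt(data_dict, mentor_name):
--     """
--     Creates a VIIT-Mentor-wise summary prompt for the LLM.
--     """
--     keys = list(data_dict)
--     mi = keys.index('Faculty Mentor from VIIT ')
--
--     # Pivot the column-wise table into row records, keep the matching records,
--     # then read each column back off the kept records.
--     kept = [row for row in zip(*data_dict.values()) if row[mi] == mentor_name]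
--     mentor_feedback = {key: [row[j] for row in kept] for j, key in enumerate(keys)}
--
--     prompt = f"""
--     Provide a summary for the VIIT Mentor '{mentor_name}' based on the following internship feedback data:
--     {mentor_feedback}
--     Summarize the mentor's involvement, feedback, and performance trends across students they supervised.
--     """
--     return prompt
-- ===== Notes on version B (the rewrite author's own statement) =====
-- stated objective: alternative
-- what changed: A filters column-major: one pass over the mentor column that appends to every column's list in a mutable dict per matching row; B pivots the table into row records with zip(*values), filters whole records once by the mentor field, and rebuilds each column from the kept records.
import Mathlib
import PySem

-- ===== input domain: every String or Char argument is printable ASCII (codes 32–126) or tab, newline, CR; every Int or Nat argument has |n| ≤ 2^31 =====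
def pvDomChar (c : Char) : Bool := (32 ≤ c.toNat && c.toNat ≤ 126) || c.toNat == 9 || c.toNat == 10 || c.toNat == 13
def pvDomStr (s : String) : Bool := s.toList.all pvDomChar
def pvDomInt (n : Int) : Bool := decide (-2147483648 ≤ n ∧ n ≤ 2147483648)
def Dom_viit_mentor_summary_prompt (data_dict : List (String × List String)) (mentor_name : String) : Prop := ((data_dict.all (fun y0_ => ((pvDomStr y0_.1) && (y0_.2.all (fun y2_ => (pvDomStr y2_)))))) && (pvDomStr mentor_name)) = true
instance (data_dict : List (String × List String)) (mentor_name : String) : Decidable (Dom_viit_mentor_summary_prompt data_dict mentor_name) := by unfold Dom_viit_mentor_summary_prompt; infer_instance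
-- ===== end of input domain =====

-- B pivots the column-wise table into row records with zip(*values), filters whole records once,
-- and reads each column back off the kept records — instead of A's column-major pass that appends
-- to every column's list per matching row (objective: alternative decomposition).

-- ===== shared format helpers (the identical f-string of both Pythons: str() of the dict) =====
-- Python repr() of a str, exact on the Dom charset (printable ASCII plus tab/newline/CR):
-- single quotes unless the string contains ' and no "; escapes backslash, the quote char, \t, \n, \r.
def pyCharEscape (q : Char) (c : Char) : List Char :=
  if c = '\\' then ['\\', '\\']
  else if c = q then ['\\', q]
  else if c = '\t' then ['\\', 't']
  else if c = '\n' then ['\\', 'n']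
  else if c = '\r' then ['\\', 'r']
  else [c]

def pyStrRepr (s : String) : String :=
  let cs := s.toList
  let q : Char := if '\'' ∈ cs ∧ '"' ∉ cs then '"' else '\''
  String.ofList (q :: (cs.flatMap (pyCharEscape q)) ++ [q])

def pyListRepr (xs : List String) : String :=
  "[" ++ String.intercalate ", " (xs.map pyStrRepr) ++ "]"

-- B's rows are tuples; but only the rebuilt per-key lists are printed, so one list repr suffices.
def pyDictRepr (items : List (String × List String)) : String :=
  "{" ++ String.intercalate ", " (items.map (fun p => pyStrRepr p.1 ++ ": " ++ pyListRepr p.2)) ++ "}"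

def pvPrompt (mentor_name : String) (items : List (String × List String)) : String :=
  "\n    Provide a summary for the VIIT Mentor '" ++ mentor_name ++
  "' based on the following internship feedback data:\n    " ++ pyDictRepr items ++
  "\n    Summarize the mentor's involvement, feedback, and performance trends across students they supervised.\n    "

def pvKey : String := "Faculty Mentor from VIIT "

-- ===== PORT A =====
-- data_dict['Faculty Mentor from VIIT '] / data_dict[key]: ported with getD (a KeyError is excluded by Pre_);
-- data_dict[key][idx]: pyGetD with default "" (an IndexError is excluded by Pre_).
def viit_mentor_summary_prompt (data_dict : List (String × List String)) (mentor_name : String) : String :=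
  let dd := PySem.Dict.mk data_dict
  let mentor_column := dd.getD pvKey []
  -- mentor_feedback = {key: [] for key in data_dict.keys()}
  let mf0 : PySem.Dict String (List String) :=
    dd.keys.foldl (fun d k => d.insert k []) PySem.Dict.empty
  -- for idx, mentor in enumerate(mentor_column): if mentor == mentor_name: for key in ...: append
  let mf := (PySem.List.enumerate mentor_column).foldl
    (fun d p =>
      if p.2 == mentor_name then
        dd.keys.foldl (fun d' k =>
          d'.modify k [] (fun l => l ++ [PySem.List.pyGetD (dd.getD k []) p.1 ""])) d
      else d) mf0
  pvPrompt mentor_name mf.items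

-- ===== PORT B =====
-- zip(*cols) (a stdlib call): the row records, truncated at the shortest column; row i = [c[i] for c in cols].
def pyZip (cols : List (List String)) : List (List String) :=
  (List.range ((cols.map List.length).min?.getD 0)).map (fun i => cols.map (fun c => c.getD i ""))

def viit_mentor_summary_prompt_alt (data_dict : List (String × List String)) (mentor_name : String) : String :=
  let dd := PySem.Dict.mk data_dict
  let keys := dd.keys
  -- mi = keys.index('Faculty Mentor from VIIT ')  (a ValueError is excluded by Pre_)
  let mi : Int := ((PySem.List.index? keys pvKey).getD 0 : Nat)
  -- kept = [row for row in zip(*data_dict.values()) if row[mi] == mentor_name]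
  let kept := (pyZip dd.values).filter (fun row => PySem.List.pyGetD row mi "" == mentor_name)
  -- mentor_feedback = {key: [row[j] for row in kept] for j, key in enumerate(keys)}
  let mentor_feedback := (PySem.List.enumerate keys).map
    (fun p => (p.2, kept.map (fun row => PySem.List.pyGetD row p.1 "")))
  pvPrompt mentor_name mentor_feedback

-- ===== PRECONDITION & SPEC =====
-- Pre_ excludes: (a) dicts without the mentor column (Python raises KeyError in A, ValueError in B),
-- (b) a matching row index out of range of some column (IndexError in A), and
-- (c) association lists with duplicate keys, which do not represent a Python dict at all.
def Pre_viit_mentor_summary_prompt (data_dict : List (String × List String)) (mentor_name : String) : Prop :=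
  (data_dict.map Prod.fst).Nodup ∧
  (PySem.Dict.mk data_dict).contains pvKey = true ∧
  ∀ p ∈ PySem.List.enumerate ((PySem.Dict.mk data_dict).getD pvKey []),
    p.2 = mentor_name → ∀ q ∈ data_dict, p.1 < (q.2.length : Int)
instance (data_dict : List (String × List String)) (mentor_name : String) : Decidable (Pre_viit_mentor_summary_prompt data_dict mentor_name) := by unfold Pre_viit_mentor_summary_prompt; infer_instance

def pvWitness_viit_mentor_summary_prompt : (List (String × List String)) × String :=
  ([("Faculty Mentor from VIIT ", ["Dr. Rao"]), ("Name", ["Asha"])], "Dr. Rao")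

def Spec_viit_mentor_summary_prompt (data_dict : List (String × List String)) (mentor_name : String) (out : String) : Prop := out = viit_mentor_summary_prompt_alt data_dict mentor_name
instance (data_dict : List (String × List String)) (mentor_name : String) (out : String) : Decidable (Spec_viit_mentor_summary_prompt data_dict mentor_name out) := by unfold Spec_viit_mentor_summary_prompt; infer_instance

-- ===== CLAIM (what is proved, stated in full; the proofs are below) =====
def Claim_equal_viit_mentor_summary_prompt : Prop := ∀ (data_dict : List (String × List String)) (mentor_name : String), Dom_viit_mentor_summary_prompt data_dict mentor_name → Pre_viit_mentor_summary_prompt data_dict mentor_name → Spec_viit_mentor_summary_prompt data_dict mentor_name (viit_mentor_summary_prompt data_dict mentor_name)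

-- ===== LEMMAS AND PROOFS =====

-- initial dict: every key inserted with []
lemma pv_getD_init (ks : List String) (d : PySem.Dict String (List String)) (k : String) :
    (ks.foldl (fun d k' => d.insert k' []) d).getD k [] =
      if k ∈ ks then [] else d.getD k [] := by
  induction ks generalizing d with
  | nil => simp
  | cons a t ih =>
    simp only [List.foldl_cons, ih, List.mem_cons, PySem.Dict.getD_insert]
    by_cases hk : k ∈ t <;> by_cases ha : k = a <;> simp [hk, ha]

-- inner loop: a key not touched keeps its value
lemma pv_getD_inner_notmem (ks : List String) (d : PySem.Dict String (List String))
    (v : String → String) (k : String) (hk : k ∉ ks) :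
    (ks.foldl (fun d' k' => d'.modify k' [] (fun l => l ++ [v k'])) d).getD k [] =
      d.getD k [] := by
  induction ks generalizing d with
  | nil => rfl
  | cons a t ih =>
    simp only [List.foldl_cons]
    rw [ih _ (fun h => hk (List.mem_cons_of_mem _ h)),
      PySem.Dict.getD_modify_of_ne]
    exact fun h => hk (h ▸ List.mem_cons_self ..)

-- inner loop: one modify per distinct key appends exactly one element at k
lemma pv_getD_inner (ks : List String) (hnd : ks.Nodup) (d : PySem.Dict String (List String))
    (v : String → String) (k : String) (hk : k ∈ ks) :
    (ks.foldl (fun d' k' => d'.modify k' [] (fun l => l ++ [v k'])) d).getD k [] =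
      d.getD k [] ++ [v k] := by
  induction ks generalizing d with
  | nil => cases hk
  | cons a t ih =>
    simp only [List.foldl_cons]
    rcases List.mem_cons.mp hk with h | h
    · subst h
      rw [pv_getD_inner_notmem t _ v k (List.nodup_cons.mp hnd).1,
        PySem.Dict.getD_modify_self]
    · rw [ih (List.nodup_cons.mp hnd).2 _ h,
        PySem.Dict.getD_modify_of_ne]
      intro he; exact (List.nodup_cons.mp hnd).1 (he ▸ h)

-- inner loop keeps the key set when every key is already present
lemma pv_keys_inner (ks : List String) (d : PySem.Dict String (List String))
    (g : String → List String → List String)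
    (h : ∀ k ∈ ks, k ∈ d.keys) :
    (ks.foldl (fun d' k' => d'.modify k' [] (g k')) d).keys = d.keys := by
  induction ks generalizing d with
  | nil => rfl
  | cons a t ih =>
    simp only [List.foldl_cons]
    have ha : d.contains a = true := by
      have := h a (List.mem_cons_self ..)
      simpa [PySem.Dict.contains_iff_mem_keys] using this
    have hkeys : (d.modify a [] (g a)).keys = d.keys := by
      rw [PySem.Dict.keys_modify, PySem.Dict.keys_insert_of_contains]
      exact ha
    rw [ih _ (fun k hk => by rw [hkeys]; exact h k (List.mem_cons_of_mem _ hk)), hkeys]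

-- outer loop: accumulated value at a key k ∈ ks
lemma pv_getD_outer (rows : List (Int × String)) (ks : List String) (hnd : ks.Nodup)
    (mn : String) (w : String → Int → String)
    (d : PySem.Dict String (List String)) (k : String) (hk : k ∈ ks) :
    (rows.foldl (fun d p =>
        if p.2 == mn then
          ks.foldl (fun d' k' => d'.modify k' [] (fun l => l ++ [w k' p.1])) d
        else d) d).getD k [] =
      d.getD k [] ++ ((rows.filter (fun p => p.2 == mn)).map (fun p => w k p.1)) := by
  induction rows generalizing d with
  | nil => simp
  | cons r t ih =>
    simp only [List.foldl_cons, List.filter_cons]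
    by_cases hr : r.2 == mn
    · simp only [hr, if_true]
      rw [ih, pv_getD_inner ks hnd d (fun k' => w k' r.1) k hk]
      simp
    · simp only [Bool.not_eq_true] at hr
      simp only [hr, Bool.false_eq_true, if_false]
      exact ih d

-- outer loop keeps the key set
lemma pv_keys_outer (rows : List (Int × String)) (ks : List String) (mn : String)
    (w : String → Int → String) (d : PySem.Dict String (List String))
    (h : ∀ k ∈ ks, k ∈ d.keys) :
    (rows.foldl (fun d p =>
        if p.2 == mn then
          ks.foldl (fun d' k' => d'.modify k' [] (fun l => l ++ [w k' p.1])) d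
        else d) d).keys = d.keys := by
  induction rows generalizing d with
  | nil => rfl
  | cons r t ih =>
    simp only [List.foldl_cons]
    by_cases hr : r.2 == mn
    · simp only [hr, if_true]
      rw [ih _ (fun k hk => by rw [pv_keys_inner ks d _ h]; exact h k hk),
        pv_keys_inner ks d _ h]
    · simp only [Bool.not_eq_true] at hr
      simp only [hr, Bool.false_eq_true, if_false]
      exact ih d h

-- the init fold over nodup keys produces exactly those keys, in order
lemma pv_keys_init (ks : List String) (hnd : ks.Nodup) :
    ((ks.foldl (fun d k => d.insert k []) (PySem.Dict.empty : PySem.Dict String (List String)))).keys = ks := by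
  rw [PySem.Dict.keys_foldl_insert]
  exact PySem.Set.ofList_eq_self_of_nodup ks hnd

-- A's whole dict-building phase, characterised: items in key order, one appended value per matching row
lemma pv_items (ks : List String) (hnd : ks.Nodup) (rows : List (Int × String)) (mn : String)
    (w : String → Int → String) :
    (rows.foldl (fun d p =>
        if p.2 == mn then
          ks.foldl (fun d' k => d'.modify k [] (fun l => l ++ [w k p.1])) d
        else d)
      (ks.foldl (fun d k => d.insert k []) (PySem.Dict.empty : PySem.Dict String (List String)))).items
    = ks.map (fun k => (k, (rows.filter (fun p => p.2 == mn)).map (fun p => w k p.1))) := by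
  have hk0 := pv_keys_init ks hnd
  have hkf : (rows.foldl (fun d p =>
        if p.2 == mn then
          ks.foldl (fun d' k => d'.modify k [] (fun l => l ++ [w k p.1])) d
        else d)
      (ks.foldl (fun d k => d.insert k []) (PySem.Dict.empty : PySem.Dict String (List String)))).keys = ks := by
    rw [pv_keys_outer rows ks mn w _ (fun k hk => by rw [hk0]; exact hk)]
    exact hk0
  rw [PySem.Dict.items_eq_map_keys _ (by rw [hkf]; exact hnd) ([] : List String), hkf]
  apply List.map_congr_left
  intro k hk
  rw [pv_getD_outer rows ks hnd mn w _ k hk, pv_getD_init, if_pos hk]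
  simp

-- first-match lookup in a nodup association list returns the pair's own column
lemma pv_getD_mk (data_dict : List (String × List String)) (hnd : (data_dict.map Prod.fst).Nodup)
    (p : String × List String) (hp : p ∈ data_dict) :
    (PySem.Dict.mk data_dict).getD p.1 [] = p.2 :=
  PySem.Dict.getD_of_mem_items (d := PySem.Dict.mk data_dict) hp hnd []

-- a filter over the shorter range equals the filter over the longer one when the predicate
-- is false on the tail
lemma pv_filter_range {α : Type} (m L : Nat) (q : Nat → Bool) (g : Nat → α)
    (hmL : m ≤ L) (hq : ∀ i, m ≤ i → i < L → q i = false) :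
    ((List.range m).filter q).map g = ((List.range L).filter q).map g := by
  conv_rhs => rw [show L = m + (L - m) from by omega, List.range_add]
  rw [List.filter_append,
    show List.filter q ((List.range (L - m)).map (fun x => m + x)) = [] from
      List.filter_eq_nil_iff.mpr (by
        intro x hx
        simp only [List.mem_map, List.mem_range] at hx
        obtain ⟨k, hk, rfl⟩ := hx
        simp [hq (m + k) (by omega) (by omega)]),
    List.append_nil]

-- B's per-column gather from the kept zip records, in canonical range-filter form
lemma pv_B_col (values : List (List String)) (mi j : Nat) (mn : String)
    (hmi : mi < values.length) (hj : j < values.length) :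
    ((pyZip values).filter (fun row => PySem.List.pyGetD row (mi : Int) "" == mn)).map
        (fun row => PySem.List.pyGetD row (j : Int) "")
      = ((List.range ((values.map List.length).min?.getD 0)).filter
          (fun i => (values[mi].getD i "" == mn))).map (fun i => values[j].getD i "") := by
  unfold pyZip
  rw [List.filter_map, List.map_map]
  have h1 : ∀ i (c : Nat) (hc : c < values.length),
      PySem.List.pyGetD (values.map (fun col => col.getD i "")) (c : Int) ""
        = values[c].getD i "" := by
    intro i c hc
    rw [PySem.List.pyGetD_natCast, List.getD_eq_getElem _ _ (by simpa using hc),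
      List.getElem_map]
  rw [show ((fun row => PySem.List.pyGetD row (mi : Int) "" == mn) ∘
      fun i => values.map (fun col => col.getD i "")) =
      (fun i => (values[mi].getD i "" == mn)) from by
    funext i; simp only [Function.comp]; rw [h1 i mi hmi]]
  apply List.map_congr_left
  intro i _
  exact h1 i j hj

-- A's per-column gather over the enumerated mentor column, in canonical range-filter form
lemma pv_A_col (mcol col : List String) (mn : String) :
    ((PySem.List.enumerate mcol).filter (fun p => p.2 == mn)).map
        (fun p => PySem.List.pyGetD col p.1 "")
      = ((List.range mcol.length).filter (fun i => (mcol.getD i "" == mn))).map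
          (fun i => col.getD i "") := by
  rw [PySem.List.enumerate_eq_map_pyRange (d := ""),
    show PySem.List.len mcol = ((mcol.length : Nat) : Int) from rfl, PySem.List.pyRange_zero_nat,
    List.filter_map, List.map_map, List.filter_map, List.map_map]
  rw [List.filter_congr (l := List.range mcol.length)
    (q := fun i : Nat => (mcol.getD i "" == mn)) (fun i _ => by simp [Function.comp])]
  apply List.map_congr_left
  intro i _
  simp [Function.comp]

-- ===== VERDICT (by name: the statement is the Claim_ definition above) =====
theorem viit_mentor_summary_prompt_spec : Claim_equal_viit_mentor_summary_prompt := by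
  intro data_dict mentor_name _ hpre
  obtain ⟨hnd, hc, hrange⟩ := hpre
  unfold Spec_viit_mentor_summary_prompt viit_mentor_summary_prompt viit_mentor_summary_prompt_alt
  show pvPrompt mentor_name
      ((PySem.List.enumerate ((PySem.Dict.mk data_dict).getD pvKey [])).foldl
        (fun d p =>
          if p.2 == mentor_name then
            (PySem.Dict.mk data_dict).keys.foldl (fun d' k =>
              d'.modify k [] (fun l => l ++ [PySem.List.pyGetD ((PySem.Dict.mk data_dict).getD k []) p.1 ""])) d
          else d)
        ((PySem.Dict.mk data_dict).keys.foldl (fun d k => d.insert k []) PySem.Dict.empty)).items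
    = pvPrompt mentor_name
      ((PySem.List.enumerate (PySem.Dict.mk data_dict).keys).map
        (fun p => (p.2,
          ((pyZip (PySem.Dict.mk data_dict).values).filter
            (fun row => PySem.List.pyGetD row
              ((((PySem.List.index? (PySem.Dict.mk data_dict).keys pvKey).getD 0 : Nat)) : Int) "" == mentor_name)).map
            (fun row => PySem.List.pyGetD row p.1 ""))))
  congr 1
  -- the mentor key's position mi₀
  have hmem : pvKey ∈ (PySem.Dict.mk data_dict).keys := by
    have := PySem.Dict.contains_iff_mem_keys (d := PySem.Dict.mk data_dict) (k := pvKey)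
    exact this.mp hc
  obtain ⟨mi₀, hmi⟩ := Option.isSome_iff_exists.mp
    ((PySem.List.index?_isSome_iff (xs := (PySem.Dict.mk data_dict).keys) (v := pvKey)).mpr hmem)
  obtain ⟨hmilt, hkmi, -⟩ := PySem.List.getElem_of_index?_eq_some hmi
  rw [pv_items ((PySem.Dict.mk data_dict).keys) (by exact hnd) _ mentor_name
    (fun k i => PySem.List.pyGetD ((PySem.Dict.mk data_dict).getD k []) i ""), hmi]
  simp only [Option.getD_some]
  -- keys/values of the literal dict
  have hkeys : (PySem.Dict.mk data_dict).keys = data_dict.map Prod.fst := rfl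
  have hlenk : (PySem.Dict.mk data_dict).keys.length = data_dict.length := by
    rw [hkeys, List.length_map]
  have hlenv : (PySem.Dict.mk data_dict).values.length = data_dict.length := by
    rw [show (PySem.Dict.mk data_dict).values = data_dict.map Prod.snd from rfl, List.length_map]
  -- lookup of the j-th key is the j-th column
  have hK : ∀ (j : Nat) (hj : j < data_dict.length),
      (PySem.Dict.mk data_dict).getD ((PySem.Dict.mk data_dict).keys[j]'(by omega)) []
        = (PySem.Dict.mk data_dict).values[j]'(by omega) := by
    intro j hj
    have hp := pv_getD_mk data_dict hnd (data_dict[j]'hj) (List.getElem_mem hj)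
    have h1 : (PySem.Dict.mk data_dict).keys[j]'(by omega) = (data_dict[j]'hj).1 :=
      List.getElem_map _
    have h2 : (PySem.Dict.mk data_dict).values[j]'(by omega) = (data_dict[j]'hj).2 :=
      List.getElem_map _
    rw [h1, h2, hp]
  -- the mentor column is the mi₀-th column
  have hmcol : (PySem.Dict.mk data_dict).getD pvKey []
      = (PySem.Dict.mk data_dict).values[mi₀]'(by omega) := by
    rw [← hkmi]; exact hK mi₀ (by omega)
  -- the truncation point of zip: m = min of the column lengths
  obtain ⟨a, ha⟩ : ∃ a, ((PySem.Dict.mk data_dict).values.map List.length).min? = some a := by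
    cases h : ((PySem.Dict.mk data_dict).values.map List.length).min? with
    | some a => exact ⟨a, rfl⟩
    | none =>
      rw [List.min?_eq_none_iff, List.map_eq_nil_iff, ← List.length_eq_zero_iff] at h
      omega
  obtain ⟨hamem, hale⟩ := List.min?_eq_some_iff.mp ha
  have hm : ((PySem.Dict.mk data_dict).values.map List.length).min?.getD 0 = a := by
    rw [ha]; rfl
  -- m ≤ length of the mentor column
  have hmL : a ≤ ((PySem.Dict.mk data_dict).values[mi₀]'(by omega)).length := by
    apply hale
    have : ((PySem.Dict.mk data_dict).values.map List.length)[mi₀]'(by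
        rw [List.length_map]; omega) = ((PySem.Dict.mk data_dict).values[mi₀]'(by omega)).length :=
      List.getElem_map _
    rw [← this]; exact List.getElem_mem _
  -- no matching row beyond the truncation point (Pre_: matching idx < every column length)
  have hq : ∀ i, a ≤ i → i < ((PySem.Dict.mk data_dict).values[mi₀]'(by omega)).length →
      (((PySem.Dict.mk data_dict).values[mi₀]'(by omega)).getD i "" == mentor_name) = false := by
    intro i him hiL
    by_contra hqf
    have hqt := Bool.not_eq_false _ |>.mp hqf
    rw [List.getD_eq_getElem _ _ hiL] at hqt
    have heq : ((PySem.Dict.mk data_dict).values[mi₀]'(by omega))[i]'hiL = mentor_name :=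
      eq_of_beq hqt
    have hpmem : (((i : Nat) : Int), mentor_name) ∈
        PySem.List.enumerate ((PySem.Dict.mk data_dict).getD pvKey []) := by
      rw [hmcol]
      exact (PySem.List.mem_enumerate_iff ..).mpr ⟨i, hiL, by rw [heq]; simp⟩
    have hall := hrange _ hpmem rfl
    obtain ⟨col, hcolmem, hcola⟩ := List.mem_map.mp hamem
    obtain ⟨q', hq'mem, hq'col⟩ := List.mem_map.mp
      (by rw [show (PySem.Dict.mk data_dict).values = data_dict.map Prod.snd from rfl] at hcolmem
          exact hcolmem)
    have := hall q' hq'mem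
    rw [← hq'col] at hcola
    omega
  -- elementwise over the keys
  apply List.ext_getElem (by simp [PySem.List.length_enumerate])
  intro j hj1 hj2
  have hjlt : j < data_dict.length := by
    rw [List.length_map, hlenk] at hj1; exact hj1
  simp only [List.getElem_map, PySem.List.getElem_enumerate]
  refine Prod.ext ?_ ?_
  · simp
  simp only [zero_add]
  rw [pv_A_col, pv_B_col _ mi₀ j mentor_name (by omega) (by omega), hK j hjlt, hmcol, hm]
  exact (pv_filter_range a _ _ _ hmL hq).symm
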